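-- pv_equiv track=rewrite | github.com/TreLiam/BUAA_Cryptography | 密码学实验/第四次实验/AES-192和AES-256.py | T
-- ===== SOURCE A (Python) =====
-- S = [['63','7c','77','7b','f2','6b','6f','c5','30','01','67','2b','fe','d7','ab','76'],
-- ['ca','82','c9','7d','fa','59','47','f0','ad','d4','a2','af','9c','a4','72','c0'],
-- ['b7','fd','93','26','36','3f','f7','cc','34','a5','e5','f1','71','d8','31','15'],
-- ['04','c7','23','c3','18','96','05','9a','07','12','80','e2','eb','27','b2','75'],
-- ['09','83','2c','1a','1b','6e','5a','a0','52','3b','d6','b3','29','e3','2f','84'],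
-- ['53','d1','00','ed','20','fc','b1','5b','6a','cb','be','39','4a','4c','58','cf'],
-- ['d0','ef','aa','fb','43','4d','33','85','45','f9','02','7f','50','3c','9f','a8'],
-- ['51','a3','40','8f','92','9d','38','f5','bc','b6','da','21','10','ff','f3','d2'],
-- ['cd','0c','13','ec','5f','97','44','17','c4','a7','7e','3d','64','5d','19','73'],
-- ['60','81','4f','dc','22','2a','90','88','46','ee','b8','14','de','5e','0b','db'],
-- ['e0','32','3a','0a','49','06','24','5c','c2','d3','ac','62','91','95','e4','79'],
-- ['e7','c8','37','6d','8d','d5','4e','a9','6c','56','f4','ea','65','7a','ae','08'],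
-- ['ba','78','25','2e','1c','a6','b4','c6','e8','dd','74','1f','4b','bd','8b','8a'],
-- ['70','3e','b5','66','48','03','f6','0e','61','35','57','b9','86','c1','1d','9e'],
-- ['e1','f8','98','11','69','d9','8e','94','9b','1e','87','e9','ce','55','28','df'],
-- ['8c','a1','89','0d','bf','e6','42','68','41','99','2d','0f','b0','54','bb','16']]
--
-- Rcon = [0x01000000, 0x02000000, 0x04000000, 0x08000000, 0x10000000,
-- 0x20000000, 0x40000000, 0x80000000, 0x1b000000, 0x36000000]
--
-- def trans(c):
--     if c == '0':
--         result = 0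
--     elif c == '1':
--         result = 1
--     elif c == '2':
--         result = 2
--     elif c == '3':
--         result = 3
--     elif c == '4':
--         result = 4
--     elif c == '5':
--         result = 5
--     elif c == '6':
--         result = 6
--     elif c == '7':
--         result = 7
--     elif c == '8':
--         result = 8
--     elif c == '9':
--         result = 9
--     elif c == 'a':
--         result = 10
--     elif c == 'b':
--         result = 11
--     elif c == 'c':
--         result = 12
--     elif c == 'd':
--         result = 13
--     elif c == 'e':
--         result = 14
--     else:
--         result = 15
--     return result
--
-- def change(c):
--     sum = 0
--     gamble = 1
--     num = []
--     for i in range(len(c)):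
--         num.append(trans(c[i]))
--     for i in range(len(c)-1,-1,-1):
--         sum = sum + gamble*num[i]
--         gamble *=16
--     return sum
--
-- def T(c,time):
--     #字循环
--     res = [c[0]+c[1],c[2]+c[3],c[4]+c[5],c[6]+c[7]]
--     temp = res[0]
--     res[0] = res[1]
--     res[1] = res[2]
--     res[2] = res[3]
--     res[3] = temp
--     #字代换
--     result = ''
--     for i in range(4):
--         m = trans(res[i][0])
--         n = trans(res[i][1])
--         result = result + S[m][n]
--     #相异或
--     number = change(result)
--     ans = number ^ Rcon[time]
--     return ans
-- ===== SOURCE B (Python) =====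
-- # B: single-pass horner accumulation over a flat integer S-box; no intermediate
-- # hex string and no separate base-16 re-parsing pass.
-- S = [['63','7c','77','7b','f2','6b','6f','c5','30','01','67','2b','fe','d7','ab','76'],
-- ['ca','82','c9','7d','fa','59','47','f0','ad','d4','a2','af','9c','a4','72','c0'],
-- ['b7','fd','93','26','36','3f','f7','cc','34','a5','e5','f1','71','d8','31','15'],
-- ['04','c7','23','c3','18','96','05','9a','07','12','80','e2','eb','27','b2','75'],
-- ['09','83','2c','1a','1b','6e','5a','a0','52','3b','d6','b3','29','e3','2f','84'],
-- ['53','d1','00','ed','20','fc','b1','5b','6a','cb','be','39','4a','4c','58','cf'],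
-- ['d0','ef','aa','fb','43','4d','33','85','45','f9','02','7f','50','3c','9f','a8'],
-- ['51','a3','40','8f','92','9d','38','f5','bc','b6','da','21','10','ff','f3','d2'],
-- ['cd','0c','13','ec','5f','97','44','17','c4','a7','7e','3d','64','5d','19','73'],
-- ['60','81','4f','dc','22','2a','90','88','46','ee','b8','14','de','5e','0b','db'],
-- ['e0','32','3a','0a','49','06','24','5c','c2','d3','ac','62','91','95','e4','79'],
-- ['e7','c8','37','6d','8d','d5','4e','a9','6c','56','f4','ea','65','7a','ae','08'],
-- ['ba','78','25','2e','1c','a6','b4','c6','e8','dd','74','1f','4b','bd','8b','8a'],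
-- ['70','3e','b5','66','48','03','f6','0e','61','35','57','b9','86','c1','1d','9e'],
-- ['e1','f8','98','11','69','d9','8e','94','9b','1e','87','e9','ce','55','28','df'],
-- ['8c','a1','89','0d','bf','e6','42','68','41','99','2d','0f','b0','54','bb','16']]
--
-- Rcon = [0x01000000, 0x02000000, 0x04000000, 0x08000000, 0x10000000,
-- 0x20000000, 0x40000000, 0x80000000, 0x1b000000, 0x36000000]
--
-- # flat integer S-box, row-major
-- SBOX = [int(x, 16) for row in S for x in row]
--
-- def trans(c):
--     if c == '0':
--         result = 0
--     elif c == '1':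
--         result = 1
--     elif c == '2':
--         result = 2
--     elif c == '3':
--         result = 3
--     elif c == '4':
--         result = 4
--     elif c == '5':
--         result = 5
--     elif c == '6':
--         result = 6
--     elif c == '7':
--         result = 7
--     elif c == '8':
--         result = 8
--     elif c == '9':
--         result = 9
--     elif c == 'a':
--         result = 10
--     elif c == 'b':
--         result = 11
--     elif c == 'c':
--         result = 12
--     elif c == 'd':
--         result = 13
--     elif c == 'e':
--         result = 14
--     else:
--         result = 15
--     return result
--
-- def T(c, time):
--     # rotate the eight hex digits left by one byte, then substitute and
--     # accumulate the 32-bit word in one pass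
--     w = c[2:8] + c[0:2]
--     number = 0
--     for i in range(4):
--         number = number * 256 + SBOX[16 * trans(w[2 * i]) + trans(w[2 * i + 1])]
--     return number ^ Rcon[time]
-- ===== Notes on version B (the rewrite author's own statement) =====
-- stated objective: simpler
-- what changed: B drops A's intermediate hex string and its separate two-pass base-16 reparse (change): it rotates by slicing and accumulates the 32-bit word in a single horner pass over a flat integer S-box, then xors Rcon[time].
import Mathlib
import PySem

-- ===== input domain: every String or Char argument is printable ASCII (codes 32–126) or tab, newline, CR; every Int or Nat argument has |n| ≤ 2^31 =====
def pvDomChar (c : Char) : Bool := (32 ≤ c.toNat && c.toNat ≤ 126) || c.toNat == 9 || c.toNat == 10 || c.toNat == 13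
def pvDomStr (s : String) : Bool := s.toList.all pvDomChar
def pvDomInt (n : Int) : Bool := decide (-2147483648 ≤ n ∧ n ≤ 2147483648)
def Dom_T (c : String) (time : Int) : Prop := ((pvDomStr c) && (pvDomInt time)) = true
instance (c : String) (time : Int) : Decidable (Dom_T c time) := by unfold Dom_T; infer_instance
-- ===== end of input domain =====

-- B replaces A's concat-hex-string-then-reparse (change) pipeline with a single
-- horner-accumulation pass over a flat integer S-box; objective: simpler.


-- ===== PORT A =====
def pvS : List (List String) :=
  [["63", "7c", "77", "7b", "f2", "6b", "6f", "c5", "30", "01", "67", "2b", "fe", "d7", "ab", "76"],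
   ["ca", "82", "c9", "7d", "fa", "59", "47", "f0", "ad", "d4", "a2", "af", "9c", "a4", "72", "c0"],
   ["b7", "fd", "93", "26", "36", "3f", "f7", "cc", "34", "a5", "e5", "f1", "71", "d8", "31", "15"],
   ["04", "c7", "23", "c3", "18", "96", "05", "9a", "07", "12", "80", "e2", "eb", "27", "b2", "75"],
   ["09", "83", "2c", "1a", "1b", "6e", "5a", "a0", "52", "3b", "d6", "b3", "29", "e3", "2f", "84"],
   ["53", "d1", "00", "ed", "20", "fc", "b1", "5b", "6a", "cb", "be", "39", "4a", "4c", "58", "cf"],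
   ["d0", "ef", "aa", "fb", "43", "4d", "33", "85", "45", "f9", "02", "7f", "50", "3c", "9f", "a8"],
   ["51", "a3", "40", "8f", "92", "9d", "38", "f5", "bc", "b6", "da", "21", "10", "ff", "f3", "d2"],
   ["cd", "0c", "13", "ec", "5f", "97", "44", "17", "c4", "a7", "7e", "3d", "64", "5d", "19", "73"],
   ["60", "81", "4f", "dc", "22", "2a", "90", "88", "46", "ee", "b8", "14", "de", "5e", "0b", "db"],
   ["e0", "32", "3a", "0a", "49", "06", "24", "5c", "c2", "d3", "ac", "62", "91", "95", "e4", "79"],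
   ["e7", "c8", "37", "6d", "8d", "d5", "4e", "a9", "6c", "56", "f4", "ea", "65", "7a", "ae", "08"],
   ["ba", "78", "25", "2e", "1c", "a6", "b4", "c6", "e8", "dd", "74", "1f", "4b", "bd", "8b", "8a"],
   ["70", "3e", "b5", "66", "48", "03", "f6", "0e", "61", "35", "57", "b9", "86", "c1", "1d", "9e"],
   ["e1", "f8", "98", "11", "69", "d9", "8e", "94", "9b", "1e", "87", "e9", "ce", "55", "28", "df"],
   ["8c", "a1", "89", "0d", "bf", "e6", "42", "68", "41", "99", "2d", "0f", "b0", "54", "bb", "16"]]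

def pvSBOX : List Int :=
  [99, 124, 119, 123, 242, 107, 111, 197, 48, 1, 103, 43, 254, 215, 171, 118,
   202, 130, 201, 125, 250, 89, 71, 240, 173, 212, 162, 175, 156, 164, 114, 192,
   183, 253, 147, 38, 54, 63, 247, 204, 52, 165, 229, 241, 113, 216, 49, 21,
   4, 199, 35, 195, 24, 150, 5, 154, 7, 18, 128, 226, 235, 39, 178, 117,
   9, 131, 44, 26, 27, 110, 90, 160, 82, 59, 214, 179, 41, 227, 47, 132,
   83, 209, 0, 237, 32, 252, 177, 91, 106, 203, 190, 57, 74, 76, 88, 207,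
   208, 239, 170, 251, 67, 77, 51, 133, 69, 249, 2, 127, 80, 60, 159, 168,
   81, 163, 64, 143, 146, 157, 56, 245, 188, 182, 218, 33, 16, 255, 243, 210,
   205, 12, 19, 236, 95, 151, 68, 23, 196, 167, 126, 61, 100, 93, 25, 115,
   96, 129, 79, 220, 34, 42, 144, 136, 70, 238, 184, 20, 222, 94, 11, 219,
   224, 50, 58, 10, 73, 6, 36, 92, 194, 211, 172, 98, 145, 149, 228, 121,
   231, 200, 55, 109, 141, 213, 78, 169, 108, 86, 244, 234, 101, 122, 174, 8,
   186, 120, 37, 46, 28, 166, 180, 198, 232, 221, 116, 31, 75, 189, 139, 138,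
   112, 62, 181, 102, 72, 3, 246, 14, 97, 53, 87, 185, 134, 193, 29, 158,
   225, 248, 152, 17, 105, 217, 142, 148, 155, 30, 135, 233, 206, 85, 40, 223,
   140, 161, 137, 13, 191, 230, 66, 104, 65, 153, 45, 15, 176, 84, 187, 22]

def pvRcon : List Int := [16777216, 33554432, 67108864, 134217728, 268435456, 536870912, 1073741824, 2147483648, 452984832, 905969664]


-- shared helper: Python's trans (hex digit, with the else→15 fallback); B keeps it verbatim
def pvTrans (ch : Char) : Int :=
  if ch = '0' then 0
  else if ch = '1' then 1
  else if ch = '2' then 2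
  else if ch = '3' then 3
  else if ch = '4' then 4
  else if ch = '5' then 5
  else if ch = '6' then 6
  else if ch = '7' then 7
  else if ch = '8' then 8
  else if ch = '9' then 9
  else if ch = 'a' then 10
  else if ch = 'b' then 11
  else if ch = 'c' then 12
  else if ch = 'd' then 13
  else if ch = 'e' then 14
  else 15

-- A's change: first pass builds num, second (reversed) pass sums with gamble
def change (cl : List Char) : Int :=
  let num : List Int :=
    (PySem.List.pyRange 0 (PySem.List.len cl) 1).foldl
      (fun acc i => acc ++ [pvTrans (PySem.List.pyGetD cl i ' ')]) []
  let p : Int × Int :=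
    (PySem.List.pyRange (PySem.List.len cl - 1) (-1) (-1)).foldl
      (fun (sg : Int × Int) i => (sg.1 + sg.2 * PySem.List.pyGetD num i 0, sg.2 * 16)) (0, 1)
  p.1

def T (c : String) (time : Int) : Int :=
  let g : Int → Char := fun i => (PySem.Str.pyGet? c i).getD ' '
  let res : List (List Char) := [[g 0, g 1], [g 2, g 3], [g 4, g 5], [g 6, g 7]]
  let temp := PySem.List.pyGetD res 0 []
  let res := PySem.List.pySetD res 0 (PySem.List.pyGetD res 1 [])
  let res := PySem.List.pySetD res 1 (PySem.List.pyGetD res 2 [])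
  let res := PySem.List.pySetD res 2 (PySem.List.pyGetD res 3 [])
  let res := PySem.List.pySetD res 3 temp
  let result : List Char :=
    (PySem.List.pyRange 0 4 1).foldl
      (fun acc i =>
        let m := pvTrans (PySem.List.pyGetD (PySem.List.pyGetD res i []) 0 ' ')
        let n := pvTrans (PySem.List.pyGetD (PySem.List.pyGetD res i []) 1 ' ')
        acc ++ (PySem.List.pyGetD (PySem.List.pyGetD pvS m []) n "").toList) []
  let number := change result
  PySem.Int.bxor number (PySem.List.pyGetD pvRcon time 0)

-- ===== PORT B =====
def T_alt (c : String) (time : Int) : Int :=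
  let w : List Char :=
    PySem.List.slice c.toList (some 2) (some 8) ++ PySem.List.slice c.toList (some 0) (some 2)
  let number : Int :=
    (PySem.List.pyRange 0 4 1).foldl
      (fun n i =>
        n * 256 +
          PySem.List.pyGetD pvSBOX
            (16 * pvTrans (PySem.List.pyGetD w (2 * i) ' ') + pvTrans (PySem.List.pyGetD w (2 * i + 1) ' ')) 0) 0
  PySem.Int.bxor number (PySem.List.pyGetD pvRcon time 0)

-- ===== PRECONDITION & SPEC =====
-- A raises IndexError when c has fewer than 8 characters or when time is outside [-10, 10).
def Pre_T (c : String) (time : Int) : Prop :=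
  8 ≤ c.toList.length ∧ -10 ≤ time ∧ time < 10
instance (c : String) (time : Int) : Decidable (Pre_T c time) := by unfold Pre_T; infer_instance

def pvWitness_T : String × Int := ("2b7e1516", 0)

def Spec_T (c : String) (time : Int) (out : Int) : Prop := out = T_alt c time
instance (c : String) (time : Int) (out : Int) : Decidable (Spec_T c time out) := by unfold Spec_T; infer_instance

-- ===== CLAIM (what is proved, stated in full; the proofs are below) =====
def Claim_equal_T : Prop := ∀ (c : String) (time : Int), Dom_T c time → Pre_T c time → Spec_T c time (T c time)

-- ===== LEMMAS AND PROOFS =====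

-- S[m][n] as a char list, for the pair lemmas
def sLk (m n : Int) : List Char :=
  (PySem.List.pyGetD (PySem.List.pyGetD pvS m []) n "").toList

theorem pvTrans_bounds (ch : Char) : 0 ≤ pvTrans ch ∧ pvTrans ch < 16 := by
  unfold pvTrans
  by_cases h0 : ch = '0'
  · rw [if_pos h0]; exact ⟨by norm_num, by norm_num⟩
  rw [if_neg h0]
  by_cases h1 : ch = '1'
  · rw [if_pos h1]; exact ⟨by norm_num, by norm_num⟩
  rw [if_neg h1]
  by_cases h2 : ch = '2'
  · rw [if_pos h2]; exact ⟨by norm_num, by norm_num⟩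
  rw [if_neg h2]
  by_cases h3 : ch = '3'
  · rw [if_pos h3]; exact ⟨by norm_num, by norm_num⟩
  rw [if_neg h3]
  by_cases h4 : ch = '4'
  · rw [if_pos h4]; exact ⟨by norm_num, by norm_num⟩
  rw [if_neg h4]
  by_cases h5 : ch = '5'
  · rw [if_pos h5]; exact ⟨by norm_num, by norm_num⟩
  rw [if_neg h5]
  by_cases h6 : ch = '6'
  · rw [if_pos h6]; exact ⟨by norm_num, by norm_num⟩
  rw [if_neg h6]
  by_cases h7 : ch = '7'
  · rw [if_pos h7]; exact ⟨by norm_num, by norm_num⟩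
  rw [if_neg h7]
  by_cases h8 : ch = '8'
  · rw [if_pos h8]; exact ⟨by norm_num, by norm_num⟩
  rw [if_neg h8]
  by_cases h9 : ch = '9'
  · rw [if_pos h9]; exact ⟨by norm_num, by norm_num⟩
  rw [if_neg h9]
  by_cases h10 : ch = 'a'
  · rw [if_pos h10]; exact ⟨by norm_num, by norm_num⟩
  rw [if_neg h10]
  by_cases h11 : ch = 'b'
  · rw [if_pos h11]; exact ⟨by norm_num, by norm_num⟩
  rw [if_neg h11]
  by_cases h12 : ch = 'c'
  · rw [if_pos h12]; exact ⟨by norm_num, by norm_num⟩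
  rw [if_neg h12]
  by_cases h13 : ch = 'd'
  · rw [if_pos h13]; exact ⟨by norm_num, by norm_num⟩
  rw [if_neg h13]
  by_cases h14 : ch = 'e'
  · rw [if_pos h14]; exact ⟨by norm_num, by norm_num⟩
  rw [if_neg h14]
  exact ⟨by norm_num, by norm_num⟩

theorem sLk_len (m n : Fin 16) : (sLk (m : Int) (n : Int)).length = 2 := by
  revert m n; decide

set_option maxRecDepth 4096 in
theorem sLk_val (m n : Fin 16) :
    (match sLk (m : Int) (n : Int) with
     | [x, y] => pvTrans x * 16 + pvTrans y
     | _ => -1) = PySem.List.pyGetD pvSBOX (16 * (m : Int) + (n : Int)) 0 := by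
  revert m n; decide

theorem ex8 (l : List Char) (hl : 8 ≤ l.length) :
    ∃ a b c d e f g h t, l = a :: b :: c :: d :: e :: f :: g :: h :: t := by
  rcases l with _|⟨a,_|⟨b,_|⟨c,_|⟨d,_|⟨e,_|⟨f,_|⟨g,_|⟨h,t⟩⟩⟩⟩⟩⟩⟩⟩ <;>
    first
      | exact ⟨_, _, _, _, _, _, _, _, _, rfl⟩
      | (exfalso; simp at hl)

theorem sLk_pair (m n : Int) (hm0 : 0 ≤ m) (hm : m < 16) (hn0 : 0 ≤ n) (hn : n < 16) :
    ∃ p q : Char, sLk m n = [p, q] ∧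
      pvTrans p * 16 + pvTrans q = PySem.List.pyGetD pvSBOX (16 * m + n) 0 := by
  have hm' : ((⟨m.toNat, by omega⟩ : Fin 16) : Int) = m := by simp [Int.toNat_of_nonneg hm0]
  have hn' : ((⟨n.toNat, by omega⟩ : Fin 16) : Int) = n := by simp [Int.toNat_of_nonneg hn0]
  have hl := sLk_len ⟨m.toNat, by omega⟩ ⟨n.toNat, by omega⟩
  have hv := sLk_val ⟨m.toNat, by omega⟩ ⟨n.toNat, by omega⟩
  rw [hm', hn'] at hl hv
  obtain ⟨p, q, hpq⟩ := List.length_eq_two.mp hl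
  rw [hpq] at hv
  exact ⟨p, q, hpq, hv⟩

theorem change_8 (a b c d e f g h : Char) :
    change [a, b, c, d, e, f, g, h] =
      ((((((pvTrans a * 16 + pvTrans b) * 16 + pvTrans c) * 16 + pvTrans d) * 16 + pvTrans e) * 16 +
        pvTrans f) * 16 + pvTrans g) * 16 + pvTrans h := by
  have h1 : PySem.List.pyRange 0 (PySem.List.len [a,b,c,d,e,f,g,h]) 1 = [0,1,2,3,4,5,6,7] := by
    simp [PySem.List.len_eq]; decide
  have h2 : PySem.List.pyRange (PySem.List.len [a,b,c,d,e,f,g,h] - 1) (-1) (-1) = [7,6,5,4,3,2,1,0] := by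
    simp [PySem.List.len_eq]; decide
  unfold change
  rw [h1, h2]
  simp only [List.foldl_cons, List.foldl_nil, List.nil_append, List.cons_append]
  norm_num [PySem.List.pyGetD_ofNat']
  ring

-- ===== VERDICT (by name: the statement is the Claim_ definition above) =====
theorem T_spec : Claim_equal_T := by
  intro c time _ hpre
  obtain ⟨h8, ht0, ht1⟩ := hpre
  obtain ⟨x0, x1, x2, x3, x4, x5, x6, x7, t, hc⟩ := ex8 c.toList h8
  unfold Spec_T T T_alt
  rw [show PySem.List.pyRange 0 4 1 = [0,1,2,3] from by decide]
  simp only [List.foldl_cons, List.foldl_nil, List.nil_append]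
  have g0 : (PySem.Str.pyGet? c (0:Int)).getD ' ' = x0 := by simp [pysem, hc]
  have g1 : (PySem.Str.pyGet? c (1:Int)).getD ' ' = x1 := by simp [pysem, hc]
  have g2 : (PySem.Str.pyGet? c (2:Int)).getD ' ' = x2 := by simp [pysem, hc]
  have g3 : (PySem.Str.pyGet? c (3:Int)).getD ' ' = x3 := by simp [pysem, hc]
  have g4 : (PySem.Str.pyGet? c (4:Int)).getD ' ' = x4 := by simp [pysem, hc]
  have g5 : (PySem.Str.pyGet? c (5:Int)).getD ' ' = x5 := by simp [pysem, hc]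
  have g6 : (PySem.Str.pyGet? c (6:Int)).getD ' ' = x6 := by simp [pysem, hc]
  have g7 : (PySem.Str.pyGet? c (7:Int)).getD ' ' = x7 := by simp [pysem, hc]
  rw [g0, g1, g2, g3, g4, g5, g6, g7]
  have hsl1 : PySem.List.slice c.toList (some 2) (some 8) = [x2, x3, x4, x5, x6, x7] := by
    rw [hc, PySem.List.slice_toNat _ (by norm_num) (by norm_num)]
    simp
  have hsl2 : PySem.List.slice c.toList (some 0) (some 2) = [x0, x1] := by
    rw [hc, PySem.List.slice_toNat _ (by norm_num) (by norm_num)]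
    simp
  rw [hsl1, hsl2]
  norm_num [PySem.List.pySetD_of_nonneg, PySem.List.pyGetD_ofNat', List.set]
  have hs : ∀ m n : Int,
      (PySem.List.pyGetD (PySem.List.pyGetD pvS m []) n "").toList = sLk m n := fun _ _ => rfl
  simp only [hs]
  norm_num [List.set, Int.toNat]
  obtain ⟨p0, q0, e0, v0⟩ := sLk_pair (pvTrans x2) (pvTrans x3)
    (pvTrans_bounds x2).1 (pvTrans_bounds x2).2 (pvTrans_bounds x3).1 (pvTrans_bounds x3).2
  obtain ⟨p1, q1, e1, v1⟩ := sLk_pair (pvTrans x4) (pvTrans x5)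
    (pvTrans_bounds x4).1 (pvTrans_bounds x4).2 (pvTrans_bounds x5).1 (pvTrans_bounds x5).2
  obtain ⟨p2, q2, e2, v2⟩ := sLk_pair (pvTrans x6) (pvTrans x7)
    (pvTrans_bounds x6).1 (pvTrans_bounds x6).2 (pvTrans_bounds x7).1 (pvTrans_bounds x7).2
  obtain ⟨p3, q3, e3, v3⟩ := sLk_pair (pvTrans x0) (pvTrans x1)
    (pvTrans_bounds x0).1 (pvTrans_bounds x0).2 (pvTrans_bounds x1).1 (pvTrans_bounds x1).2
  rw [e0, e1, e2, e3]
  simp only [List.cons_append, List.nil_append]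
  rw [change_8]
  congr 1
  rw [← v0, ← v1, ← v2, ← v3]
  ring
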